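-- pv_equiv track=rewrite | github.com/paulosllvn/CITS1401-Python-Problem-Solving | Project 2 - Plagiarism Detection Tool/Project2.py | conjunctions
-- ===== SOURCE A (Python) =====
-- def conjunctions(text):
--     newlist = []
--
--     # If symbols are their own words do we strip those?
--     for word in text:
--         for j, letter in enumerate(word):
--             if not letter.isalnum():
--                 word = word.replace(letter, '')
--         newlist.append(word)
--
--     dict_conjunctions = {'also': 0, 'although': 0, 'and': 0, 'as': 0, 'because': 0, 'before': 0, 'but': 0,
--                          'for': 0, 'if': 0, 'nor': 0, 'of': 0, 'or': 0, 'since': 0, 'that': 0, 'though': 0,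
--                          'until': 0, 'when': 0, 'whenever': 0, 'whereas': 0, 'which': 0, 'while': 0, 'yet': 0}
--
--     for i in newlist:
--         if i in dict_conjunctions:
--             dict_conjunctions[i] += 1
--
--     return dict_conjunctions
-- ===== SOURCE B (Python) =====
-- CONJ_KEYS = ['also', 'although', 'and', 'as', 'because', 'before', 'but',
--              'for', 'if', 'nor', 'of', 'or', 'since', 'that', 'though',
--              'until', 'when', 'whenever', 'whereas', 'which', 'while', 'yet']
--
--
-- def conjunctions(text):
--     cleaned = [''.join(ch for ch in word if ch.isalnum()) for word in text]
--     return {k: cleaned.count(k) for k in CONJ_KEYS}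
-- ===== Notes on version B (the rewrite author's own statement) =====
-- stated objective: simpler
-- what changed: Cleaning becomes a direct filter-join per word instead of repeated whole-word replace calls, and the zero-initialised dict updated by a membership-guarded increment pass is replaced by a comprehension that counts each of the 22 fixed conjunctions in the cleaned list.
import Mathlib
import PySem

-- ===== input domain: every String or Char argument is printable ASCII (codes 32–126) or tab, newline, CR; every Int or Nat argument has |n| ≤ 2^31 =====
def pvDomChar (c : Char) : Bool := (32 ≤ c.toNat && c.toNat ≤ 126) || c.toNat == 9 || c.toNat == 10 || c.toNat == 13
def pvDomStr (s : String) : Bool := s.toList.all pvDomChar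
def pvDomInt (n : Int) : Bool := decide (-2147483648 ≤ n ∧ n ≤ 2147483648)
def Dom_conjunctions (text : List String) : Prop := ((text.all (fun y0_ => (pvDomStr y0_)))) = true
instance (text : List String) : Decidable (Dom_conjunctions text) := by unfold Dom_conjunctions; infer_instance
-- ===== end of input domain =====

-- B replaces A's per-letter whole-word replace() cleaning by a filter-join, and A's
-- zero-initialised dict updated in one guarded pass by counting each fixed key directly (objective: simpler).

-- ===== PORT A =====
-- one step of A's inner loop: if not letter.isalnum(): word = word.replace(letter, '')
def stepClean (w : String) (letter : Char) : String :=
  if !(PySem.Chars.isalnum letter) then PySem.Str.replace w (String.ofList [letter]) "" else w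

-- one step of A's counting loop: if i in dict_conjunctions: dict_conjunctions[i] += 1
def stepCount (d : PySem.Dict String Int) (i : String) : PySem.Dict String Int :=
  if d.contains i then d.modify i 0 (· + 1) else d

-- A's literal initial dict
def conjDict0 : PySem.Dict String Int := PySem.Dict.ofList
  [("also", 0), ("although", 0), ("and", 0), ("as", 0), ("because", 0), ("before", 0), ("but", 0),
   ("for", 0), ("if", 0), ("nor", 0), ("of", 0), ("or", 0), ("since", 0), ("that", 0), ("though", 0),
   ("until", 0), ("when", 0), ("whenever", 0), ("whereas", 0), ("which", 0), ("while", 0), ("yet", 0)]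

def conjunctions (text : List String) : List (String × Int) :=
  let newlist := text.foldl (fun acc word =>
    let word := (PySem.List.enumerate word.toList).foldl (fun w p => stepClean w p.2) word
    acc ++ [word]) []
  let dict := newlist.foldl stepCount conjDict0
  dict.items

-- ===== PORT B =====
def conjKeys : List String :=
  ["also", "although", "and", "as", "because", "before", "but",
   "for", "if", "nor", "of", "or", "since", "that", "though",
   "until", "when", "whenever", "whereas", "which", "while", "yet"]

def conjunctions_alt (text : List String) : List (String × Int) :=
  let cleaned := text.map (fun word => String.ofList (word.toList.filter PySem.Chars.isalnum))
  conjKeys.map (fun k => (k, (PySem.List.count cleaned k : Int)))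

-- ===== PRECONDITION & SPEC =====
def Spec_conjunctions (text : List String) (out : List (String × Int)) : Prop := out = conjunctions_alt text
instance (text : List String) (out : List (String × Int)) : Decidable (Spec_conjunctions text out) := by unfold Spec_conjunctions; infer_instance

-- ===== CLAIM (what is proved, stated in full; the proofs are below) =====
def Claim_equal_conjunctions : Prop := ∀ (text : List String), Dom_conjunctions text → Spec_conjunctions text (conjunctions text)

-- ===== LEMMAS AND PROOFS =====

-- word.replace(letter, '') removes every occurrence of that single character
theorem replace_go_single (c : Char) (fuel : Nat) :
    ∀ (l acc : List Char), l.length ≤ fuel →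
      PySem.Chars.replace.go [c] [] fuel l acc = acc.reverse ++ l.filter (fun x => !(x == c)) := by
  induction fuel with
  | zero =>
    intro l acc h
    have : l = [] := List.length_eq_zero_iff.mp (Nat.le_zero.mp h)
    subst this
    simp [PySem.Chars.replace.go]
  | succ n ih =>
    intro l acc h
    cases l with
    | nil => simp [PySem.Chars.replace.go]
    | cons c' t =>
      simp only [PySem.Chars.replace.go]
      by_cases hc : c = c'
      · subst hc
        have hpre : List.isPrefixOf [c] (c :: t) = true := by simp [List.isPrefixOf]
        rw [if_pos hpre]
        simp only [List.length_cons] at h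
        rw [ih _ _ (by simpa using Nat.le_of_succ_le_succ h)]
        simp
      · have hpre : List.isPrefixOf [c] (c' :: t) = false := by
          simp [List.isPrefixOf]; exact hc
        rw [if_neg (by simp [hpre])]
        simp only [List.length_cons] at h
        rw [ih _ _ (Nat.le_of_succ_le_succ h)]
        simp [Ne.symm hc]

theorem replace_single (c : Char) (cs : List Char) :
    PySem.Chars.replace cs [c] [] = cs.filter (fun x => !(x == c)) := by
  rw [PySem.Chars.replace]
  simp only [List.isEmpty_cons, if_false, Bool.false_eq_true]
  simpa using replace_go_single c cs.length cs [] (Nat.le_refl _)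

-- the effect of A's whole inner cleaning loop on the character list
theorem cleanFold_toList (L : List Char) :
    ∀ (w : String), (L.foldl stepClean w).toList
      = w.toList.filter (fun x => !(L.any (fun c => !(PySem.Chars.isalnum c) && x == c))) := by
  induction L with
  | nil => intro w; simp
  | cons c L ih =>
    intro w
    rw [List.foldl_cons, ih]
    unfold stepClean
    by_cases hc : PySem.Chars.isalnum c = true
    · rw [if_neg (by simp [hc])]
      apply List.filter_congr
      intro x _
      simp [List.any_cons, hc]
    · rw [if_pos (by simp [Bool.not_eq_true] at hc ⊢; exact hc)]
      rw [PySem.Str.toList_replace]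
      rw [String.toList_ofList, show ("" : String).toList = ([] : List Char) from rfl,
        replace_single, List.filter_filter]
      apply List.filter_congr
      intro x _
      simp only [List.any_cons, Bool.not_eq_true] at hc ⊢
      simp [hc, Bool.and_comm]

-- A's cleaning of one word equals B's filter-join
theorem cleanA_eq (w : String) :
    (PySem.List.enumerate w.toList).foldl (fun w p => stepClean w p.2) w
      = String.ofList (w.toList.filter PySem.Chars.isalnum) := by
  have henum : (PySem.List.enumerate w.toList).foldl (fun w p => stepClean w p.2) w
      = w.toList.foldl stepClean w := by
    conv_rhs => rw [← PySem.List.map_snd_enumerate (xs := w.toList) (s := 0)]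
    rw [List.foldl_map]
  rw [henum]
  apply String.toList_inj.mp
  rw [cleanFold_toList, String.toList_ofList]
  apply List.filter_congr
  intro x hx
  by_cases hax : PySem.Chars.isalnum x = true
  · simp only [hax]
    rw [Bool.not_eq_true', List.any_eq_false]
    intro c _
    by_cases hcx : x = c
    · subst hcx; simp [hax]
    · simp
      exact fun _ => hcx
  · simp only [Bool.not_eq_true] at hax
    simp only [hax]
    rw [Bool.not_eq_false', List.any_eq_true]
    exact ⟨x, hx, by simp [hax]⟩

-- keys are unchanged by A's guarded counting loop
theorem keys_stepCount_fold (l : List String) :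
    ∀ d : PySem.Dict String Int, (l.foldl stepCount d).keys = d.keys := by
  induction l with
  | nil => intro d; rfl
  | cons x l ih =>
    intro d
    rw [List.foldl_cons]
    by_cases hx : d.contains x = true
    · have hstep : stepCount d x = d.modify x 0 (· + 1) := by unfold stepCount; rw [if_pos hx]
      rw [hstep, ih, PySem.Dict.keys_modify, PySem.Dict.keys_insert_of_contains _ _ hx]
    · have hstep : stepCount d x = d := by unfold stepCount; rw [if_neg hx]
      rw [hstep, ih]

-- A's guarded counting loop counts occurrences of each key already present
theorem getD_stepCount_fold (l : List String) :
    ∀ (d : PySem.Dict String Int) (k : String), d.contains k = true →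
      (l.foldl stepCount d).getD k 0 = d.getD k 0 + (l.count k : Int) := by
  induction l with
  | nil => intro d k _; simp
  | cons x l ih =>
    intro d k hk
    rw [List.foldl_cons]
    by_cases hx : d.contains x = true
    · have hstep : stepCount d x = d.modify x 0 (· + 1) := by unfold stepCount; rw [if_pos hx]
      have hk' : (d.modify x 0 (· + 1)).contains k = true := by
        rw [PySem.Dict.contains_modify]; simp [hk]
      rw [hstep, ih _ _ hk', PySem.Dict.getD_modify, List.count_cons]
      by_cases hkx : k = x
      · subst hkx; simp; ring
      · simp [hkx, Ne.symm hkx]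
    · have hstep : stepCount d x = d := by unfold stepCount; rw [if_neg hx]
      have hne : x ≠ k := by intro h; subst h; rw [hk] at hx; exact hx rfl
      rw [hstep, ih d k hk, List.count_cons]
      simp
      exact hne

-- the literal dict: its keys are conjKeys, each contained with value 0
theorem conjDict0_keys : conjDict0.keys = conjKeys := by decide

theorem conjDict0_nodup : conjDict0.keys.Nodup := by decide

theorem conjDict0_facts : ∀ k ∈ conjKeys, conjDict0.contains k = true ∧ conjDict0.getD k 0 = 0 := by
  decide

-- ===== VERDICT (by name: the statement is the Claim_ definition above) =====
theorem conjunctions_spec : Claim_equal_conjunctions := by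
  intro text _
  unfold Spec_conjunctions conjunctions conjunctions_alt
  simp only [PySem.List.foldl_append_singleton_eq_map, List.nil_append]
  rw [show (text.map fun word => (PySem.List.enumerate word.toList).foldl (fun w p => stepClean w p.2) word)
      = text.map (fun word => String.ofList (word.toList.filter PySem.Chars.isalnum)) from
    List.map_congr_left (fun w _ => cleanA_eq w)]
  set cleaned := text.map (fun word => String.ofList (word.toList.filter PySem.Chars.isalnum)) with hcl
  have hnd : (cleaned.foldl stepCount conjDict0).keys.Nodup := by
    rw [keys_stepCount_fold]; exact conjDict0_nodup
  rw [PySem.Dict.items_eq_map_keys _ hnd 0, keys_stepCount_fold, conjDict0_keys]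
  apply List.map_congr_left
  intro k hk
  obtain ⟨hc, hg⟩ := conjDict0_facts k hk
  rw [getD_stepCount_fold _ _ _ hc, hg, PySem.List.count_eq]
  simp
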